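-- pv_equiv track=rewrite | github.com/clint-project/polarization_metrics | chamber_analysis.py | get_topusers_community
-- ===== SOURCE A (Python) =====
-- def top_n_keys(input_dict, top_entries):
--     """
--     Function to remove all the keys except for those with the top N values
--     Parameters
--     input_dict: input dictionary
--     top_entries: number of top entries to keep
--     """
--     # sort the dictionary
--     sorted_items = sorted(input_dict.items(), key=lambda item: item[1], reverse=True)
--
--     # take the top N items
--     top_n_items = sorted_items[:top_entries]
--
--     # create the new dictionary
--     top_n_dict = dict(top_n_items)
--
--     return top_n_dict
--
-- def get_community_size(community_info):
--     """
--     Function to transform the dictionary of nodes and communities to a dictionary with communities and their size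
--     Parameters
--     community_info: dictionary with nodes as keys and communities as values
--
--     Returns
--     community_counts: dictionary with communities as keys as size as values
--
--     """
--     community_counts = {}
--     for community in community_info.values():
--         if community_counts.get(community,"error")!="error":
--             community_counts[community] += 1
--         else:
--             community_counts[community] = 1
--
--     return community_counts
--
-- def get_topusers_community(modules,node_inflow,number_top_users):
--     """
--     Function to transform the dictionary of nodes and communities to a dictionary with communities and their size
--     :param modules:
--     :param module_size
--     :param top_users
--
--     :return
--     Returns
--     community_counts: dictionary with communities as keys as size as values
--
--     """
--     user_dict={}
--     community_dict={}
--     module_size=get_community_size(modules)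
--     module_size=top_n_keys(module_size,100)
--     for user in modules:
--         if node_inflow.get(user,"error")!="error":
--             if module_size.get(modules[user],"error")!="error":
--                 community_dict[modules[user]]=community_dict.setdefault(modules[user],{})
--                 community_dict[modules[user]][user]=node_inflow[user]
--     for community in community_dict:
--         community_dict[community]=top_n_keys(community_dict[community], number_top_users)
--         for user in community_dict[community]:
--             if node_inflow[user]>0:
--                 user_dict[user]=node_inflow[user]
--     return user_dict
-- ===== SOURCE B (Python) =====
-- def get_topusers_community(modules, node_inflow, number_top_users):
--     # one counting pass for community sizes
--     sizes = {}
--     for c in modules.values():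
--         sizes[c] = sizes.get(c, 0) + 1
--     # the 100 largest communities (stable sort by size, descending)
--     top_comms = {c for c, _ in sorted(sizes.items(), key=lambda kv: kv[1], reverse=True)[:100]}
--     # flat list of valid entries, and communities in first-appearance order
--     valid = [(u, c) for u, c in modules.items() if u in node_inflow and c in top_comms]
--     entries = [(u, c, node_inflow[u]) for u, c in valid]
--     order = list(dict.fromkeys(c for _, c in valid))
--     # ONE global stable sort by inflow descending, partitioned into per-community buckets
--     ranked = sorted(entries, key=lambda e: e[2], reverse=True)
--     buckets = {}
--     for u, c, w in ranked:
--         buckets.setdefault(c, []).append((u, w))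
--     result = {}
--     for c in order:
--         for u, w in buckets[c][:number_top_users]:
--             if w > 0:
--                 result[u] = w
--     return result
-- ===== Notes on version B (the rewrite author's own statement) =====
-- stated objective: alternative
-- what changed: B replaces A's dict-of-dicts grouping with per-community top_n_keys sorts by one flat valid-entry list, a single global stable sort by inflow partitioned into per-community buckets, plus a one-pass size count and an explicit first-appearance order list.
import Mathlib
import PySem

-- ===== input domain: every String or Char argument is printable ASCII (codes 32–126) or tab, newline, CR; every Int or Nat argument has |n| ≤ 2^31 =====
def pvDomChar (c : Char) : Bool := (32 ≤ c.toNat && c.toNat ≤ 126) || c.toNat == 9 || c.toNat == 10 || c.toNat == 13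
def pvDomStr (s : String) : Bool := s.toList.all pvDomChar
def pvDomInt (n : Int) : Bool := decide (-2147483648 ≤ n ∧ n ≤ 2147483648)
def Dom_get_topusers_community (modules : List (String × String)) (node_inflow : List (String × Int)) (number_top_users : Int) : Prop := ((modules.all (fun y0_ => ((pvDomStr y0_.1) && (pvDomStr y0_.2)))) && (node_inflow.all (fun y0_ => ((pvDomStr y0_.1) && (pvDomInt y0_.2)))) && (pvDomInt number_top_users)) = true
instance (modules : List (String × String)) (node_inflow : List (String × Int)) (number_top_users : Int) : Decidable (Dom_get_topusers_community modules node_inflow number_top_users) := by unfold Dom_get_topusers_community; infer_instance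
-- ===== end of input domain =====

-- B replaces A's dict-of-dicts plus a per-community sort with one flat valid-entry list,
-- a single global stable sort partitioned into buckets, and a first-appearance order list
-- (objective: alternative decomposition, same asymptotic cost).

-- ===== PORT A =====

-- top_n_keys: sort items by value descending (stable), slice [:top_entries], rebuild a dict
def pvTopNKeysA (input_dict : PySem.Dict String Int) (top_entries : Int) : PySem.Dict String Int :=
  let sorted_items := PySem.List.sorted input_dict.items (fun item => item.2) true
  let top_n_items := PySem.List.slice sorted_items none (some top_entries)
  top_n_items.foldl (fun d p => d.insert p.1 p.2) PySem.Dict.empty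

-- get_community_size: the `get(community,"error")!="error"` sentinel test is exactly
-- "the key is present" here, since the stored counts are ints and never the string "error"
def pvCommunitySizeA (community_info : PySem.Dict String String) : PySem.Dict String Int :=
  community_info.values.foldl
    (fun d community =>
      if (d.get? community).isSome then d.insert community (d.getD community 0 + 1)
      else d.insert community 1)
    PySem.Dict.empty

def get_topusers_community (modules : List (String × String)) (node_inflow : List (String × Int)) (number_top_users : Int) : List (String × Int) :=
  -- the Python function receives dicts; build them from the association lists (last value wins)
  let modulesD := PySem.Dict.ofList modules
  let inflowD := PySem.Dict.ofList node_inflow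
  let module_size := pvTopNKeysA (pvCommunitySizeA modulesD) 100
  -- `for user in modules` iterates the keys; we carry the items so that modules[user] is p.2
  -- (exact: the dict's keys are unique).  `node_inflow.get(user,"error")!="error"` is again presence.
  -- `community_dict[c]=community_dict.setdefault(c,{})` followed by `community_dict[c][user]=v`
  -- nets to: store (old inner dict, defaulting to {}) with user↦v added, at key c (insert keeps
  -- position for an existing c and appends a fresh c — exactly setdefault's placement).
  let community_dict := modulesD.items.foldl
    (fun cd p =>
      match inflowD.get? p.1 with
      | none => cd
      | some w =>
        if (module_size.get? p.2).isSome then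
          cd.insert p.2 ((cd.getD p.2 PySem.Dict.empty).insert p.1 w)
        else cd)
    (PySem.Dict.empty : PySem.Dict String (PySem.Dict String Int))
  -- second loop: reassigning community_dict[community] does not affect user_dict, which is
  -- all that is returned, so we fold over the items snapshot
  let user_dict := community_dict.items.foldl
    (fun ud q =>
      let top := pvTopNKeysA q.2 number_top_users
      top.keys.foldl
        (fun ud user =>
          if inflowD.getD user 0 > 0 then ud.insert user (inflowD.getD user 0) else ud)
        ud)
    (PySem.Dict.empty : PySem.Dict String Int)
  user_dict.items

-- ===== PORT B =====

def get_topusers_community_alt (modules : List (String × String)) (node_inflow : List (String × Int)) (number_top_users : Int) : List (String × Int) :=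
  let modulesD := PySem.Dict.ofList modules
  let inflowD := PySem.Dict.ofList node_inflow
  -- sizes[c] = sizes.get(c, 0) + 1
  let sizes := modulesD.values.foldl (fun d c => d.insert c (d.getD c 0 + 1)) (PySem.Dict.empty : PySem.Dict String Int)
  -- {c for c, _ in sorted(sizes.items(), key=value, reverse=True)[:100]}
  let topComms : PySem.Set String :=
    PySem.Set.ofList ((PySem.List.slice (PySem.List.sorted sizes.items (fun kv => kv.2) true) none (some 100)).map (fun kv => kv.1))
  let valid := modulesD.items.filter (fun p => inflowD.contains p.1 && topComms.contains p.2)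
  let entries := valid.map (fun p => (p.1, p.2, inflowD.getD p.1 0))
  -- list(dict.fromkeys(...)) is ordered dedup
  let order := PySem.List.dedup (valid.map (fun p => p.2))
  let ranked := PySem.List.sorted entries (fun e => e.2.2) true
  -- buckets.setdefault(c, []).append((u, w))
  let buckets := ranked.foldl (fun d e => d.modify e.2.1 [] (fun b => b ++ [(e.1, e.2.2)]))
    (PySem.Dict.empty : PySem.Dict String (List (String × Int)))
  -- buckets[c] is present for every c in order; getD's default is never used
  let result := order.foldl
    (fun ud c =>
      (PySem.List.slice (buckets.getD c []) none (some number_top_users)).foldl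
        (fun ud p => if p.2 > 0 then ud.insert p.1 p.2 else ud) ud)
    (PySem.Dict.empty : PySem.Dict String Int)
  result.items

-- ===== PRECONDITION & SPEC =====
def Spec_get_topusers_community (modules : List (String × String)) (node_inflow : List (String × Int)) (number_top_users : Int) (out : List (String × Int)) : Prop := out = get_topusers_community_alt modules node_inflow number_top_users
instance (modules : List (String × String)) (node_inflow : List (String × Int)) (number_top_users : Int) (out : List (String × Int)) : Decidable (Spec_get_topusers_community modules node_inflow number_top_users out) := by unfold Spec_get_topusers_community; infer_instance

-- ===== CLAIM (what is proved, stated in full; the proofs are below) =====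
def Claim_equal_get_topusers_community : Prop := ∀ (modules : List (String × String)) (node_inflow : List (String × Int)) (number_top_users : Int), Dom_get_topusers_community modules node_inflow number_top_users → Spec_get_topusers_community modules node_inflow number_top_users (get_topusers_community modules node_inflow number_top_users)

-- ===== LEMMAS AND PROOFS =====

lemma pv_insertBy_nil {α : Type} (bf : α → α → Bool) (x : α) :
    PySem.List.insertBy bf x [] = [x] := rfl

lemma pv_insertBy_cons {α : Type} (bf : α → α → Bool) (x y : α) (ys : List α) :
    PySem.List.insertBy bf x (y :: ys) =
      if bf x y then x :: y :: ys else y :: PySem.List.insertBy bf x ys := rfl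

lemma pv_map_insertBy {α β : Type} (g : α → β) (bf : α → α → Bool) (bg : β → β → Bool)
    (h : ∀ a b, bf a b = bg (g a) (g b)) (x : α) (ys : List α) :
    (PySem.List.insertBy bf x ys).map g = PySem.List.insertBy bg (g x) (ys.map g) := by
  induction ys with
  | nil => rfl
  | cons y ys ih =>
    rw [pv_insertBy_cons, List.map_cons, pv_insertBy_cons, ← h]
    split_ifs <;> simp [ih]

lemma pv_sorted_map {α β κ : Type} [LinearOrder κ] (g : α → β) (key : β → κ) (l : List α) :
    PySem.List.sorted (l.map g) key true = (PySem.List.sorted l (fun a => key (g a)) true).map g := by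
  rw [PySem.List.sorted_rev_eq_foldl_insertBy, PySem.List.sorted_rev_eq_foldl_insertBy]
  suffices h : ∀ (l : List α) (acc : List α),
      List.foldl (fun a x => PySem.List.insertBy (fun a b => decide (key b < key a)) x a) (acc.map g) (l.map g)
        = (List.foldl (fun a x => PySem.List.insertBy (fun a b => decide (key (g b) < key (g a))) x a) acc l).map g by
    simpa using h l []
  intro l
  induction l with
  | nil => intro acc; rfl
  | cons a l ih =>
    intro acc
    simp only [List.map_cons, List.foldl_cons]
    rw [← pv_map_insertBy g _ _ (fun a b => rfl) a acc, ih]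

lemma pv_filter_insertBy {α κ : Type} [LinearOrder κ] (key : α → κ) (p : α → Bool) (x : α) :
    ∀ (ys : List α), ys.Pairwise (fun a b => key b ≤ key a) →
    (PySem.List.insertBy (fun a b => decide (key b < key a)) x ys).filter p
      = if p x then PySem.List.insertBy (fun a b => decide (key b < key a)) x (ys.filter p)
        else ys.filter p := by
  intro ys
  induction ys with
  | nil =>
    intro _
    rw [pv_insertBy_nil]
    by_cases hpx : p x <;> simp [hpx, pv_insertBy_nil]
  | cons y ys ih =>
    intro hpw
    have hpw' : ys.Pairwise (fun a b => key b ≤ key a) := hpw.of_cons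
    have hle : ∀ z ∈ ys, key z ≤ key y := fun z hz => (List.pairwise_cons.mp hpw).1 z hz
    rw [pv_insertBy_cons]
    by_cases hcmp : key y < key x
    · -- x goes in front; every kept element still compares below x
      simp only [hcmp, decide_true, if_true]
      by_cases hpx : p x
      · simp only [List.filter_cons, hpx, if_true]
        cases hfy : (if p y = true then y :: List.filter p ys else List.filter p ys) with
        | nil => rw [pv_insertBy_nil]
        | cons z zs =>
          have hz : z ∈ y :: ys := by
            have : z ∈ (y :: ys).filter p := by
              rw [List.filter_cons, hfy]; exact List.mem_cons_self ..
            exact List.mem_of_mem_filter this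
          have hzle : key z ≤ key y := by
            rcases List.mem_cons.mp hz with h | h
            · exact le_of_eq (by rw [h])
            · exact hle z h
          have hd : decide (key z < key x) = true := decide_eq_true (lt_of_le_of_lt hzle hcmp)
          rw [pv_insertBy_cons, hd]
          simp
      · simp [hpx, List.filter_cons]
    · simp only [hcmp, decide_false, Bool.false_eq_true, if_false]
      rw [List.filter_cons, List.filter_cons]
      by_cases hpy : p y
      · simp only [hpy, if_true]
        rw [ih hpw']
        by_cases hpx : p x
        · simp only [hpx, if_true]
          rw [pv_insertBy_cons]
          simp [hcmp]
        · simp [hpx]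
      · simp only [hpy, Bool.false_eq_true, if_false]
        rw [ih hpw']

lemma pv_sorted_append_singleton {α κ : Type} [LinearOrder κ] (key : α → κ) (l : List α) (x : α) :
    PySem.List.sorted (l ++ [x]) key true
      = PySem.List.insertBy (fun a b => decide (key b < key a)) x (PySem.List.sorted l key true) := by
  rw [PySem.List.sorted_rev_eq_foldl_insertBy, PySem.List.sorted_rev_eq_foldl_insertBy,
    List.foldl_append]
  rfl

lemma pv_filter_sorted {α κ : Type} [LinearOrder κ] (key : α → κ) (p : α → Bool) (l : List α) :
    (PySem.List.sorted l key true).filter p = PySem.List.sorted (l.filter p) key true := by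
  induction l using List.reverseRecOn with
  | nil => rfl
  | append_singleton l x ih =>
    rw [pv_sorted_append_singleton, List.filter_append,
      pv_filter_insertBy key p x _ (PySem.List.sorted_pairwise_rev l key), ih]
    by_cases hpx : p x
    · simp only [List.filter_cons, hpx, if_true, List.filter_nil]
      rw [pv_sorted_append_singleton]
    · simp [hpx]


lemma pv_slice_sublist {α : Type} (L : List α) (b : Option Int) :
    (PySem.List.slice L none b).Sublist L := by
  simp only [PySem.List.slice]
  exact (List.take_sublist ..).trans (List.drop_sublist ..)

lemma pv_group_getD (v : String × String → Int) :
    ∀ (l : List (String × String)) (d : PySem.Dict String (PySem.Dict String Int)) (c : String),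
    (l.foldl (fun cd p => cd.insert p.2 ((cd.getD p.2 PySem.Dict.empty).insert p.1 (v p))) d).getD c PySem.Dict.empty
      = (l.filter (fun p => p.2 == c)).foldl (fun inner p => inner.insert p.1 (v p)) (d.getD c PySem.Dict.empty) := by
  intro l
  induction l with
  | nil => intro d c; rfl
  | cons q l ih =>
    intro d c
    rw [List.foldl_cons, List.filter_cons, ih]
    by_cases h : q.2 = c
    · subst h
      simp [PySem.Dict.getD_insert_self]
    · have hb : (q.2 == c) = false := beq_eq_false_iff_ne.mpr h
      simp [hb, PySem.Dict.getD_insert, Ne.symm h]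

lemma pv_sizes_eq (m : PySem.Dict String String) :
    pvCommunitySizeA m = m.values.foldl (fun d c => d.insert c (d.getD c 0 + 1)) PySem.Dict.empty := by
  unfold pvCommunitySizeA
  apply PySem.List.foldl_congr_mem
  intro d c _
  by_cases h : (d.get? c).isSome
  · simp [h]
  · have hn : d.get? c = none := Option.not_isSome_iff_eq_none.mp h
    simp only [h, Bool.false_eq_true, if_false]
    rw [PySem.Dict.getD_eq_get?_getD, hn]
    norm_num

lemma pv_topnkeys_keys (d : PySem.Dict String Int) (n : Int) :
    (pvTopNKeysA d n).keys
      = PySem.Set.ofList ((PySem.List.slice (PySem.List.sorted d.items (fun kv => kv.2) true) none (some n)).map (fun kv => kv.1)) := by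
  have := PySem.Dict.keys_foldl_insert_key
    (PySem.List.slice (PySem.List.sorted d.items (fun kv => kv.2) true) none (some n))
    (fun (p : String × Int) => p.1) (fun _ p => p.2) PySem.Dict.empty
  exact this

lemma pv_topnkeys_contains (d : PySem.Dict String Int) (n : Int) (c : String) :
    ((pvTopNKeysA d n).get? c).isSome
      = (PySem.Set.ofList ((PySem.List.slice (PySem.List.sorted d.items (fun kv => kv.2) true) none (some n)).map (fun kv => kv.1))).contains c := by
  rw [← PySem.Dict.contains_eq_isSome_get?, Bool.eq_iff_iff]
  rw [PySem.Dict.contains_iff_mem_keys, pv_topnkeys_keys]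
  exact (List.contains_iff_mem).symm


lemma pv_items_insert_fold (L : List (String × Int)) (h : (L.map (fun p => p.1)).Nodup) :
    (L.foldl (fun d p => d.insert p.1 p.2) (PySem.Dict.empty : PySem.Dict String Int)).items = L := by
  have := PySem.Dict.items_foldl_insert_fresh L (fun p => p.1) (fun p => p.2) PySem.Dict.empty
    (fun a _ => PySem.Dict.contains_empty _) h
  simpa using this

lemma pv_buckets_getD (ranked : List (String × String × Int)) (c : String) :
    (ranked.foldl (fun d e => d.modify e.2.1 [] (fun b => b ++ [(e.1, e.2.2)]))
      (PySem.Dict.empty : PySem.Dict String (List (String × Int)))).getD c []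
      = (ranked.filter (fun e => e.2.1 == c)).map (fun e => (e.1, e.2.2)) := by
  have h1 : ranked.foldl (fun d e => d.modify e.2.1 [] (fun b => b ++ [(e.1, e.2.2)]))
      (PySem.Dict.empty : PySem.Dict String (List (String × Int)))
      = (ranked.map (fun e => (e.2.1, (e.1, e.2.2)))).foldl
          (fun d p => d.modify p.1 [] (fun b => b ++ [p.2])) PySem.Dict.empty := by
    rw [List.foldl_map]
  rw [h1, PySem.Dict.getD_foldl_modify_append, List.filter_map, List.map_map]
  rfl

lemma pv_sorted_bucket (inflowD : PySem.Dict String Int) (valid : List (String × String)) (c : String) :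
    PySem.List.sorted ((valid.filter (fun p => p.2 == c)).map (fun p => (p.1, inflowD.getD p.1 0)))
        (fun item => item.2) true
      = ((PySem.List.sorted (valid.map (fun p => (p.1, p.2, inflowD.getD p.1 0))) (fun e => e.2.2) true).filter
          (fun e => e.2.1 == c)).map (fun e => (e.1, e.2.2)) := by
  rw [pv_filter_sorted, List.filter_map]
  have hc : ((fun (e : String × String × Int) => e.2.1 == c) ∘ (fun (p : String × String) => (p.1, p.2, inflowD.getD p.1 0)))
      = (fun (p : String × String) => p.2 == c) := rfl
  rw [hc, pv_sorted_map, pv_sorted_map, List.map_map]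
  rfl

lemma pv_main (inflowD : PySem.Dict String Int) (valid : List (String × String))
    (hnd : (valid.map (fun p => p.1)).Nodup) (n : Int) :
    (valid.foldl
        (fun cd p => cd.insert p.2 ((cd.getD p.2 PySem.Dict.empty).insert p.1 (inflowD.getD p.1 0)))
        (PySem.Dict.empty : PySem.Dict String (PySem.Dict String Int))).items.foldl
      (fun ud q =>
        (pvTopNKeysA q.2 n).keys.foldl
          (fun ud user => if inflowD.getD user 0 > 0 then ud.insert user (inflowD.getD user 0) else ud) ud)
      (PySem.Dict.empty : PySem.Dict String Int)
    = (PySem.List.dedup (valid.map (fun p => p.2))).foldl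
        (fun ud c =>
          (PySem.List.slice
            (((PySem.List.sorted (valid.map (fun p => (p.1, p.2, inflowD.getD p.1 0))) (fun e => e.2.2) true).foldl
               (fun d e => d.modify e.2.1 [] (fun b => b ++ [(e.1, e.2.2)])) PySem.Dict.empty).getD c [])
            none (some n)).foldl
          (fun ud p => if p.2 > 0 then ud.insert p.1 p.2 else ud) ud)
        (PySem.Dict.empty : PySem.Dict String Int) := by
  have hkeys : (valid.foldl
        (fun cd p => cd.insert p.2 ((cd.getD p.2 PySem.Dict.empty).insert p.1 (inflowD.getD p.1 0)))
        (PySem.Dict.empty : PySem.Dict String (PySem.Dict String Int))).keys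
      = PySem.List.dedup (valid.map (fun p => p.2)) := by
    have := PySem.Dict.keys_foldl_insert_key valid (fun (p : String × String) => p.2)
      (fun cd p => (cd.getD p.2 PySem.Dict.empty).insert p.1 (inflowD.getD p.1 0)) PySem.Dict.empty
    exact this
  have hnodk := PySem.Dict.nodup_keys_foldl_insert_key valid (fun (p : String × String) => p.2)
      (fun cd p => (cd.getD p.2 PySem.Dict.empty).insert p.1 (inflowD.getD p.1 0)) PySem.Dict.empty
      PySem.Dict.nodup_keys_empty
  rw [PySem.Dict.items_eq_map_keys _ hnodk PySem.Dict.empty, hkeys, List.foldl_map]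
  apply PySem.List.foldl_congr_mem
  intro ud c _
  simp only []
  have hgetD : (valid.foldl
        (fun cd p => cd.insert p.2 ((cd.getD p.2 PySem.Dict.empty).insert p.1 (inflowD.getD p.1 0)))
        (PySem.Dict.empty : PySem.Dict String (PySem.Dict String Int))).getD c PySem.Dict.empty
      = (valid.filter (fun p => p.2 == c)).foldl
          (fun inner p => inner.insert p.1 (inflowD.getD p.1 0)) PySem.Dict.empty := by
    rw [pv_group_getD (fun p => inflowD.getD p.1 0) valid PySem.Dict.empty c, PySem.Dict.getD_empty]
  have hndc : ((valid.filter (fun p => p.2 == c)).map (fun p => p.1)).Nodup :=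
    (((List.filter_sublist (p := fun p => p.2 == c) (l := valid))).map (fun p => p.1)).nodup hnd
  have hinner : ((valid.filter (fun p => p.2 == c)).foldl
          (fun inner p => inner.insert p.1 (inflowD.getD p.1 0)) PySem.Dict.empty).items
      = (valid.filter (fun p => p.2 == c)).map (fun p => (p.1, inflowD.getD p.1 0)) := by
    have := PySem.Dict.items_foldl_insert_fresh (valid.filter (fun p => p.2 == c))
      (fun p => p.1) (fun p => inflowD.getD p.1 0) PySem.Dict.empty
      (fun a _ => PySem.Dict.contains_empty _) hndc
    simpa using this
  have hndb : ((PySem.List.slice (PySem.List.sorted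
        ((valid.filter (fun p => p.2 == c)).map (fun p => (p.1, inflowD.getD p.1 0)))
        (fun item => item.2) true) none (some n)).map (fun p => p.1)).Nodup := by
    have hperm : ((PySem.List.sorted
          ((valid.filter (fun p => p.2 == c)).map (fun p => (p.1, inflowD.getD p.1 0)))
          (fun item => item.2) true).map (fun p => p.1)).Perm
        ((((valid.filter (fun p => p.2 == c)).map (fun p => (p.1, inflowD.getD p.1 0)))).map (fun p => p.1)) :=
      (PySem.List.sorted_perm _ _ _).map _
    have h0 : ((((valid.filter (fun p => p.2 == c)).map (fun p => (p.1, inflowD.getD p.1 0)))).map (fun p => p.1)).Nodup := by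
      rw [List.map_map]
      exact hndc
    exact ((pv_slice_sublist _ _).map _).nodup (hperm.nodup_iff.mpr h0)
  rw [hgetD]
  simp only [pvTopNKeysA, PySem.Dict.keys]
  rw [hinner, pv_items_insert_fold _ hndb, List.foldl_map, pv_buckets_getD, ← pv_sorted_bucket]
  apply PySem.List.foldl_congr_mem
  intro acc p hp
  have hpb : p ∈ (valid.filter (fun p => p.2 == c)).map (fun p => (p.1, inflowD.getD p.1 0)) := by
    have h1 := (pv_slice_sublist _ _).subset hp
    rwa [PySem.List.mem_sorted] at h1
  obtain ⟨q, hq, rfl⟩ := List.mem_map.mp hpb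
  rfl

-- ===== VERDICT (by name: the statement is the Claim_ definition above) =====
theorem get_topusers_community_spec : Claim_equal_get_topusers_community := by
  intro modules node_inflow n _
  unfold Spec_get_topusers_community
  simp only [get_topusers_community, get_topusers_community_alt]
  rw [pv_sizes_eq]
  have hstep : (fun (cd : PySem.Dict String (PySem.Dict String Int)) (p : String × String) =>
      match (PySem.Dict.ofList node_inflow).get? p.1 with
      | none => cd
      | some w =>
        if ((pvTopNKeysA ((PySem.Dict.ofList modules).values.foldl
              (fun d c => d.insert c (d.getD c 0 + 1)) PySem.Dict.empty) 100).get? p.2).isSome then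
          cd.insert p.2 ((cd.getD p.2 PySem.Dict.empty).insert p.1 w)
        else cd)
      = (fun cd p =>
        if (PySem.Dict.ofList node_inflow).contains p.1
            && (PySem.Set.ofList ((PySem.List.slice (PySem.List.sorted
                  ((PySem.Dict.ofList modules).values.foldl
                    (fun d c => d.insert c (d.getD c 0 + 1)) (PySem.Dict.empty : PySem.Dict String Int)).items
                  (fun kv => kv.2) true) none (some 100)).map (fun kv => kv.1))).contains p.2 then
          cd.insert p.2 ((cd.getD p.2 PySem.Dict.empty).insert p.1 ((PySem.Dict.ofList node_inflow).getD p.1 0))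
        else cd) := by
    funext cd p
    cases h : (PySem.Dict.ofList node_inflow).get? p.1 with
    | none => simp [PySem.Dict.contains_eq_isSome_get?, h]
    | some w =>
      rw [pv_topnkeys_contains]
      have hc : (PySem.Dict.ofList node_inflow).contains p.1 = true := by
        rw [PySem.Dict.contains_eq_isSome_get?, h]; rfl
      rw [hc, Bool.true_and]
      simp only [h, PySem.Dict.getD_eq_get?_getD, Option.getD_some]
  rw [hstep, ← List.foldl_filter]
  have hnd : (((PySem.Dict.ofList modules).items.filter (fun p =>
      (PySem.Dict.ofList node_inflow).contains p.1
        && (PySem.Set.ofList ((PySem.List.slice (PySem.List.sorted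
              ((PySem.Dict.ofList modules).values.foldl
                (fun d c => d.insert c (d.getD c 0 + 1)) (PySem.Dict.empty : PySem.Dict String Int)).items
              (fun kv => kv.2) true) none (some 100)).map (fun kv => kv.1))).contains p.2)).map
      (fun p => p.1)).Nodup := by
    exact List.Nodup.sublist (List.Sublist.map _ List.filter_sublist) (PySem.Dict.nodup_keys_ofList modules)
  exact congrArg PySem.Dict.items (pv_main (PySem.Dict.ofList node_inflow) _ hnd n)
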